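-- pv_equiv track=rewrite | github.com/Inaki1210/LEPL1401_perso | CM4-TP4-M4/bioinfo.py | minuscule
-- ===== SOURCE A (Python) =====
-- def minuscule(text):
--     # pré : prendre un ADN (au préalablement vérifier donc non vérifié dans cette fonction) avec majuscules et minuscules
--     # post : mettre tous les caractères majuscules en minuscule et laisser les minuscules
--     rst = ''
--     for caract1 in text:
--         if caract1 == 'A':
--             rst += 'a'
--         elif caract1 == 'C':
--             rst += 'c'
--         elif caract1 == 'G':
--             rst += 'g'
--         elif caract1 == 'T':
--             rst += 't'
--         else:
--             rst += caract1
--     return rst #sortie de la chaîne en full minuscules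
-- ===== SOURCE B (Python) =====
-- def minuscule(text):
--     # staged whole-string passes: each uppercase DNA letter is rewritten
--     # across the entire string in its own pass; later passes never touch
--     # the lowercase output of earlier ones.
--     for up, low in (('A', 'a'), ('C', 'c'), ('G', 'g'), ('T', 't')):
--         text = text.replace(up, low)
--     return text
-- ===== Notes on version B (the rewrite author's own statement) =====
-- stated objective: idiomatic
-- what changed: Replaces A's single per-character pass with an if/elif chain and string concatenation by four staged whole-string str.replace passes, one per DNA letter (correct because the lowercase output of one pass is never touched by a later pass).
import Mathlib
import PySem

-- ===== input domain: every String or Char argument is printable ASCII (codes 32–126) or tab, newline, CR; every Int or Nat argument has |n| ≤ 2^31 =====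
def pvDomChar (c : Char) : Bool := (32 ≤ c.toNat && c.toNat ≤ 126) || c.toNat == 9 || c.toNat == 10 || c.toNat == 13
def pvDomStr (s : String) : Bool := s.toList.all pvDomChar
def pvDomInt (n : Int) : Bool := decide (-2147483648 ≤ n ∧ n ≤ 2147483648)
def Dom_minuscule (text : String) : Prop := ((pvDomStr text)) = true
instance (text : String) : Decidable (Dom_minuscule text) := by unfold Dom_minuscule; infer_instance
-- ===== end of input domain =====

-- B replaces A's single per-character if/elif accumulator pass by four staged
-- whole-string replace passes (Python str.replace), one per DNA letter.

-- ===== PORT A =====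
-- literal transliteration of A: accumulate rst over the characters with the if/elif chain
def minuscule (text : String) : String :=
  text.toList.foldl
    (fun rst caract1 =>
      if caract1 = 'A' then rst ++ ['a']
      else if caract1 = 'C' then rst ++ ['c']
      else if caract1 = 'G' then rst ++ ['g']
      else if caract1 = 'T' then rst ++ ['t']
      else rst ++ [caract1]) []
  |> String.ofList

-- ===== PORT B =====
-- Source B's loop over the four (upper, lower) pairs, each iteration one text.replace
def minuscule_alt (text : String) : String :=
  [('A', 'a'), ('C', 'c'), ('G', 'g'), ('T', 't')].foldl
    (fun text p => PySem.Str.replace text (String.ofList [p.1]) (String.ofList [p.2])) text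

-- ===== PRECONDITION & SPEC =====
def Spec_minuscule (text : String) (out : String) : Prop := out = minuscule_alt text
instance (text : String) (out : String) : Decidable (Spec_minuscule text out) := by unfold Spec_minuscule; infer_instance

-- ===== CLAIM =====
def Claim_equal_minuscule : Prop := ∀ (text : String), Dom_minuscule text → Spec_minuscule text (minuscule text)

-- ===== LEMMAS AND PROOFS =====
-- single-char replace is a map: the fuelled scanner with old = [c] substitutes pointwise
theorem replaceGo_single (c d : Char) (l acc : List Char) (fuel : Nat)
    (h : l.length ≤ fuel) :
    PySem.Chars.replace.go [c] [d] fuel l acc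
      = acc.reverse ++ l.map (fun x => if x = c then d else x) := by
  induction l generalizing fuel acc with
  | nil =>
    cases fuel <;> simp [PySem.Chars.replace.go]
  | cons x t ih =>
    cases fuel with
    | zero => simp at h
    | succ f =>
      simp only [List.length_cons, Nat.succ_le_succ_iff] at h
      by_cases hx : x = c
      · subst hx
        simp [PySem.Chars.replace.go, List.isPrefixOf, ih _ _ h]
      · have : ¬ [c].isPrefixOf (x :: t) = true := by
          simp [List.isPrefixOf]; intro hc; exact hx hc.symm
        simp [PySem.Chars.replace.go, this, ih _ _ h, hx]

theorem replace_single (c d : Char) (l : List Char) :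
    PySem.Chars.replace l [c] [d] = l.map (fun x => if x = c then d else x) := by
  simp [PySem.Chars.replace, replaceGo_single c d l [] l.length (le_refl _)]

-- A's fold appends one mapped character per step
theorem minuscule_foldl (l acc : List Char) :
    l.foldl
      (fun rst caract1 =>
        if caract1 = 'A' then rst ++ ['a']
        else if caract1 = 'C' then rst ++ ['c']
        else if caract1 = 'G' then rst ++ ['g']
        else if caract1 = 'T' then rst ++ ['t']
        else rst ++ [caract1]) acc
    = acc ++ l.map (fun x =>
        if x = 'A' then 'a' else if x = 'C' then 'c'
        else if x = 'G' then 'g' else if x = 'T' then 't' else x) := by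
  induction l generalizing acc with
  | nil => simp
  | cons x t ih =>
    simp only [List.foldl_cons, List.map_cons, ih]
    by_cases h1 : x = 'A'
    · simp [h1]
    by_cases h2 : x = 'C'
    · simp [h2]
    by_cases h3 : x = 'G'
    · simp [h3]
    by_cases h4 : x = 'T'
    · simp [h4]
    simp [h1, h2, h3, h4]

-- the four staged passes compose to one pointwise substitution
theorem replace_chain (l : List Char) :
    PySem.Chars.replace
      (PySem.Chars.replace
        (PySem.Chars.replace (PySem.Chars.replace l ['A'] ['a']) ['C'] ['c'])
        ['G'] ['g']) ['T'] ['t']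
    = l.map (fun x =>
        if x = 'A' then 'a' else if x = 'C' then 'c'
        else if x = 'G' then 'g' else if x = 'T' then 't' else x) := by
  simp only [replace_single, List.map_map]
  apply List.map_congr_left
  intro x _
  by_cases h1 : x = 'A'
  · simp [h1]
  by_cases h2 : x = 'C'
  · simp [h2]
  by_cases h3 : x = 'G'
  · simp [h3]
  by_cases h4 : x = 'T'
  · simp [h4]
  simp [h1, h2, h3, h4]

-- ===== VERDICT =====
theorem minuscule_spec : Claim_equal_minuscule := by
  intro text _
  unfold Spec_minuscule minuscule minuscule_alt
  rw [minuscule_foldl]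
  simp only [List.foldl_cons, List.foldl_nil, PySem.Str.replace,
    String.toList_ofList, replace_chain, List.nil_append]
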